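-- pv_equiv track=rewrite | github.com/hhb2006/hhb-2024fall-cs101 | 已做题目/C_ 洋葱.py | find_max_layer
-- ===== SOURCE A (Python) =====
-- def find_max_layer(N, matrix):
--     x0,y0,l,res = 0,0,N,0
--     for t in range(0, (N + 1) // 2):  #t表示层数
--         sum_layer = 0
--         for i in range(x0, x0+l):
--             if i == x0 or i == x0+l-1:
--                 sum_layer += sum(matrix[i][y0:y0+l])
--             else:
--                 sum_layer += matrix[i][y0] + matrix[i][y0+l-1]
--         res = max(res,sum_layer)
--         x0 += 1
--         y0 += 1
--         l -= 2
--     return res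
-- ===== SOURCE B (Python) =====
-- def peel(sq, n):
--     # max ring sum of the n x n onion sq, floored at 0, by peeling off the outer ring
--     if n <= 0:
--         return 0
--     if n == 1:
--         return max(sum(sq[0]), 0)
--     perim = sum(sq[0]) + sum(sq[n - 1])
--     for i in range(1, n - 1):
--         perim += sq[i][0] + sq[i][n - 1]
--     inner = peel([row[1:n - 1] for row in sq[1:n - 1]], n - 2)
--     return max(perim, inner)
--
-- def find_max_layer(N, matrix):
--     sq = [row[:N] for row in matrix[:N]]
--     return peel(sq, N)
-- ===== Notes on version B (the rewrite author's own statement) =====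
-- stated objective: alternative
-- what changed: B recursively peels the onion: it slices the top-left N x N square, sums the outer perimeter of the current square (whole first and last rows plus the side cells), builds the inner submatrix by slicing off the border, and recurses, taking the max against the recursive result; A instead iterates over layers with index state x0,y0,l and an edge/interior branch per row.
import Mathlib
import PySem

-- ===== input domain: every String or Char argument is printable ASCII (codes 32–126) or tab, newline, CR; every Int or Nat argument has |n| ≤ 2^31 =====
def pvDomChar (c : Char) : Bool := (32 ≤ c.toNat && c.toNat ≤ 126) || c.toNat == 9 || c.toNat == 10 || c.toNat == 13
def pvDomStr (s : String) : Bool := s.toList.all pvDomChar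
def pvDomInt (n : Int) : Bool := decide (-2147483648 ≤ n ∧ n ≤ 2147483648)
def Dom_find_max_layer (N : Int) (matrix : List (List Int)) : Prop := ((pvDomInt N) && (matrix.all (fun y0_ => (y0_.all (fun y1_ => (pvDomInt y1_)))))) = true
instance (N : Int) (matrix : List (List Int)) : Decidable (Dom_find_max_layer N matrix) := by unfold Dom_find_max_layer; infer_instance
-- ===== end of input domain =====

-- B recursively peels the outer ring (perimeter of the sliced N×N square + recursion on the
-- sliced-off inner submatrix) instead of A's indexed layer loop; same cost, alternative algorithm.

-- ===== PORT A =====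
def find_max_layer (N : Int) (matrix : List (List Int)) : Int :=
  (((PySem.List.pyRange 0 (PySem.Int.floordiv (N + 1) 2) 1).foldl
    (fun (st : Int × Int × Int × Int) (_t : Int) =>
      match st with
      | (x0, y0, l, res) =>
        let sum_layer : Int :=
          (PySem.List.pyRange x0 (x0 + l) 1).foldl
            (fun s i =>
              if i = x0 ∨ i = x0 + l - 1 then
                s + (PySem.List.slice (PySem.List.pyGetD matrix i []) (some y0) (some (y0 + l))).sum
              else
                s + (PySem.List.pyGetD (PySem.List.pyGetD matrix i []) y0 0
                     + PySem.List.pyGetD (PySem.List.pyGetD matrix i []) (y0 + l - 1) 0)) 0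
        (x0 + 1, y0 + 1, l - 2, max res sum_layer))
    (0, 0, N, 0))).2.2.2

-- ===== PORT B =====
def peel (sq : List (List Int)) (n : Int) : Int :=
  if n ≤ 0 then 0
  else if n = 1 then max (PySem.List.pyGetD sq 0 []).sum 0
  else
    let perim : Int := (PySem.List.pyGetD sq 0 []).sum + (PySem.List.pyGetD sq (n - 1) []).sum
    let perim2 : Int :=
      (PySem.List.pyRange 1 (n - 1) 1).foldl
        (fun s i =>
          s + (PySem.List.pyGetD (PySem.List.pyGetD sq i []) 0 0
               + PySem.List.pyGetD (PySem.List.pyGetD sq i []) (n - 1) 0)) perim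
    let inner : Int :=
      peel ((PySem.List.slice sq (some 1) (some (n - 1))).map
              (fun row => PySem.List.slice row (some 1) (some (n - 1)))) (n - 2)
    max perim2 inner
termination_by n.toNat
decreasing_by omega

def find_max_layer_alt (N : Int) (matrix : List (List Int)) : Int :=
  peel ((PySem.List.slice matrix none (some N)).map
          (fun row => PySem.List.slice row none (some N))) N

-- ===== PRECONDITION & SPEC =====
-- Exactly the inputs on which A returns: for N ≥ 1 it needs N rows and, in the middle
-- rows 1..N-2, direct indexing up to column N-1 (IndexError otherwise); edge rows are sliced (clamped).
def Pre_find_max_layer (N : Int) (matrix : List (List Int)) : Prop :=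
  N ≤ 0 ∨ (N ≤ (matrix.length : Int) ∧ ∀ row ∈ (matrix.drop 1).take (N.toNat - 2), N ≤ (row.length : Int))
instance (N : Int) (matrix : List (List Int)) : Decidable (Pre_find_max_layer N matrix) := by unfold Pre_find_max_layer; infer_instance
def pvWitness_find_max_layer : Int × List (List Int) := (3, [[1, 2, 3], [4, 5, 6], [7, 8, 9]])

def Spec_find_max_layer (N : Int) (matrix : List (List Int)) (out : Int) : Prop := out = find_max_layer_alt N matrix
instance (N : Int) (matrix : List (List Int)) (out : Int) : Decidable (Spec_find_max_layer N matrix out) := by unfold Spec_find_max_layer; infer_instance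

-- ===== CLAIM (what is proved, stated in full; the proofs are below) =====
def Claim_equal_find_max_layer : Prop := ∀ (N : Int) (matrix : List (List Int)), Dom_find_max_layer N matrix → Pre_find_max_layer N matrix → Spec_find_max_layer N matrix (find_max_layer N matrix)

-- ===== LEMMAS AND PROOFS =====

-- the submatrix of rows t..t+n-1, columns t..t+n-1 (rows clamped as Python slices clamp)
def pvSq (matrix : List (List Int)) (t n : Nat) : List (List Int) :=
  ((matrix.drop t).take n).map (fun row => (row.drop t).take n)

theorem peel_nonneg_fuel : ∀ (fuel : Nat) (sq : List (List Int)) (n : Int), n.toNat ≤ fuel → 0 ≤ peel sq n := by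
  intro fuel
  induction fuel with
  | zero =>
    intro sq n h
    have h0 : n ≤ 0 := by omega
    rw [peel, if_pos h0]
  | succ f ihf =>
    intro sq n h
    by_cases h0 : n ≤ 0
    · rw [peel, if_pos h0]
    · by_cases h1 : n = 1
      · rw [peel, if_neg h0, if_pos h1]; exact le_max_right _ _
      · rw [peel, if_neg h0, if_neg h1]
        exact le_trans (ihf _ (n - 2) (by omega)) (le_max_right _ _)

theorem peel_nonneg (sq : List (List Int)) (n : Int) : 0 ≤ peel sq n :=
  peel_nonneg_fuel n.toNat sq n le_rfl

theorem peel_nonpos (sq : List (List Int)) (n : Int) (h : n ≤ 0) : peel sq n = 0 := by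
  rw [peel]; simp [h]

-- One layer: A's row loop over the ring equals the edge decomposition (g = slice-sum of a row,
-- h = the two side cells of a middle row), for every l ≥ 1.
theorem layer_eq (g h : Int → Int) (t l : Int) (hl : 1 ≤ l) :
    (PySem.List.pyRange t (t + l) 1).foldl
      (fun s i => if i = t ∨ i = t + l - 1 then s + g i else s + h i) 0
    = (if 1 < l then
        (PySem.List.pyRange (t + 1) (t + l - 1) 1).foldl (fun s i => s + h i) (g t + g (t + l - 1))
      else g t) := by
  rcases lt_or_ge 1 l with h2 | h1
  · rw [if_pos h2]
    have h3 : t + l - 1 + 1 - 1 = t + l - 1 := by ring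
    have hb : t + l = (t + l - 1) + 1 := by ring
    have hsplit : PySem.List.pyRange t (t + l) 1
        = t :: (PySem.List.pyRange (t + 1) (t + l - 1) 1 ++ [t + l - 1]) := by
      rw [PySem.List.pyRange_one_cons (by omega), hb,
          PySem.List.pyRange_one_succ_right (by omega), h3]
    rw [hsplit]
    simp only [List.foldl_append, List.foldl]
    rw [if_pos (Or.inr trivial), if_pos (Or.inl trivial)]
    have hmid :
        List.foldl (fun s i => if i = t ∨ i = t + l - 1 then s + g i else s + h i) (0 + g t)
          (PySem.List.pyRange (t + 1) (t + l - 1) 1)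
        = List.foldl (fun s i => s + h i) (0 + g t) (PySem.List.pyRange (t + 1) (t + l - 1) 1) := by
      apply PySem.List.foldl_congr_mem
      intro acc x hx
      rw [PySem.List.mem_pyRange_one] at hx
      rw [if_neg (by omega)]
    rw [hmid, PySem.List.foldl_add, PySem.List.foldl_add]
    ring
  · have hl1 : l = 1 := by omega
    subst hl1
    rw [if_neg (by omega), PySem.List.pyRange_one_singleton]
    simp only [List.foldl]
    rw [if_pos (Or.inl trivial)]
    ring

-- Outer loop invariant (proved in the previous step of this development): A's fold from layer a
-- equals the fold of per-layer edge sums.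
theorem outer_eq (N : Int) (matrix : List (List Int)) :
    ∀ (n : Nat) (a res : Int), n = (PySem.Int.floordiv (N + 1) 2 - a).toNat →
    (((PySem.List.pyRange a (PySem.Int.floordiv (N + 1) 2) 1).foldl
        (fun (st : Int × Int × Int × Int) (_t : Int) =>
          match st with
          | (x0, y0, l, res) =>
            let sum_layer : Int :=
              (PySem.List.pyRange x0 (x0 + l) 1).foldl
                (fun s i =>
                  if i = x0 ∨ i = x0 + l - 1 then
                    s + (PySem.List.slice (PySem.List.pyGetD matrix i []) (some y0) (some (y0 + l))).sum
                  else
                    s + (PySem.List.pyGetD (PySem.List.pyGetD matrix i []) y0 0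
                         + PySem.List.pyGetD (PySem.List.pyGetD matrix i []) (y0 + l - 1) 0)) 0
            (x0 + 1, y0 + 1, l - 2, max res sum_layer))
        (a, a, N - 2 * a, res))).2.2.2
    = (PySem.List.pyRange a (PySem.Int.floordiv (N + 1) 2) 1).foldl
        (fun res t =>
          let l := N - 2 * t
          let s0 : Int := (PySem.List.slice (PySem.List.pyGetD matrix t []) (some t) (some (t + l))).sum
          let s : Int :=
            if 1 < l then
              (PySem.List.pyRange (t + 1) (t + l - 1) 1).foldl
                (fun s i =>
                  s + (PySem.List.pyGetD (PySem.List.pyGetD matrix i []) t 0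
                       + PySem.List.pyGetD (PySem.List.pyGetD matrix i []) (t + l - 1) 0))
                (s0 + (PySem.List.slice (PySem.List.pyGetD matrix (t + l - 1) []) (some t) (some (t + l))).sum)
            else s0
          max res s) res := by
  intro n
  induction n with
  | zero =>
    intro a res hn
    have hK : PySem.Int.floordiv (N + 1) 2 ≤ a := by omega
    rw [PySem.List.pyRange_one_eq_nil hK]
    rfl
  | succ m ih =>
    intro a res hn
    by_cases hK : a < PySem.Int.floordiv (N + 1) 2
    · rw [PySem.List.pyRange_one_cons hK]
      simp only [List.foldl_cons]
      have hl : 1 ≤ N - 2 * a := by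
        have := (PySem.Int.le_floordiv_iff_mul_le (a := N + 1) (b := 2) (q := a + 1) (by omega)).mp (by omega)
        omega
      have hlayer := layer_eq
        (fun i => (PySem.List.slice (PySem.List.pyGetD matrix i []) (some a) (some (a + (N - 2 * a)))).sum)
        (fun i => PySem.List.pyGetD (PySem.List.pyGetD matrix i []) a 0
                  + PySem.List.pyGetD (PySem.List.pyGetD matrix i []) (a + (N - 2 * a) - 1) 0)
        a (N - 2 * a) hl
      rw [hlayer]
      have hstep : N - 2 * a - 2 = N - 2 * (a + 1) := by ring
      have heq : a + (N - 2 * a) = N - a := by ring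
      have heq1 : a + (N - 2 * a) - 1 = N - a - 1 := by ring
      rw [heq, heq1] at *
      have := ih (a + 1) (max res (if 1 < N - 2 * a then
          (PySem.List.pyRange (a + 1) (N - a - 1) 1).foldl
            (fun s i =>
              s + (PySem.List.pyGetD (PySem.List.pyGetD matrix i []) a 0
                   + PySem.List.pyGetD (PySem.List.pyGetD matrix i []) (N - a - 1) 0))
            ((PySem.List.slice (PySem.List.pyGetD matrix a []) (some a) (some (N - a))).sum
             + (PySem.List.slice (PySem.List.pyGetD matrix (N - a - 1) []) (some a) (some (N - a))).sum)
        else (PySem.List.slice (PySem.List.pyGetD matrix a []) (some a) (some (N - a))).sum)) (by omega)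
      rw [hstep]
      convert this using 3
    · rw [PySem.List.pyRange_one_eq_nil (by omega)]
      rfl

theorem fdiv_bounds (N : Int) : N ≤ 2 * PySem.Int.floordiv (N + 1) 2 ∧ 2 * PySem.Int.floordiv (N + 1) 2 ≤ N + 1 := by
  constructor
  · by_contra hc
    have := (PySem.Int.le_floordiv_iff_mul_le (a := N + 1) (b := 2)
      (q := PySem.Int.floordiv (N + 1) 2 + 1) (by omega)).mpr (by omega)
    omega
  · have := (PySem.Int.le_floordiv_iff_mul_le (a := N + 1) (b := 2)
      (q := PySem.Int.floordiv (N + 1) 2) (by omega)).mp (by omega)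
    omega

-- shrinking the submatrix: slicing off the border of pvSq t n gives pvSq (t+1) (n-2)
theorem shrink_eq (matrix : List (List Int)) (t n : Nat) (h2 : 2 ≤ n) :
    (PySem.List.slice (pvSq matrix t n) (some 1) (some ((n : Int) - 1))).map
      (fun row => PySem.List.slice row (some 1) (some ((n : Int) - 1)))
    = pvSq matrix (t + 1) (n - 2) := by
  have hone : (1 : Int) = ((1 : Nat) : Int) := rfl
  have hc : ((n : Int) - 1) = (((n - 1 : Nat)) : Int) := by omega
  rw [hc, hone]
  simp only [PySem.List.slice_natCast, pvSq]
  rw [← List.map_drop, ← List.map_take, List.map_map]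
  have h1 : n - 1 - 1 = n - 2 := by omega
  rw [List.drop_take, List.take_take, List.drop_drop]
  have h2 : min (n - 1 - 1) (n - 1) = n - 2 := by omega
  have h3 : t + 1 = 1 + t := by omega
  rw [h2, h3]
  apply List.map_congr_left
  intro row _
  simp only [Function.comp_apply]
  rw [List.drop_take, List.take_take, List.drop_drop, h2, h3]

theorem pvSq_getD (matrix : List (List Int)) (t n i : Nat) (hi : i < n) (hlen : t + n ≤ matrix.length) :
    (pvSq matrix t n).getD i [] = ((matrix.getD (t + i) []).drop t).take n := by
  have hti : t + i < matrix.length := by omega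
  have hlen1 : i < (pvSq matrix t n).length := by
    simp only [pvSq, List.length_map, List.length_take, List.length_drop]; omega
  rw [List.getD_eq_getElem _ _ hlen1]
  simp only [pvSq, List.getElem_map, List.getElem_take, List.getElem_drop]
  rw [List.getD_eq_getElem _ _ hti]

theorem row_getD (row : List Int) (t n k : Nat) (hk : k < n) (hlen : t + n ≤ row.length) :
    ((row.drop t).take n).getD k 0 = row.getD (t + k) 0 := by
  have htk : t + k < row.length := by omega
  have hlen1 : k < ((row.drop t).take n).length := by
    simp only [List.length_take, List.length_drop]; omega
  rw [List.getD_eq_getElem _ _ hlen1]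
  simp only [List.getElem_take, List.getElem_drop]
  rw [List.getD_eq_getElem _ _ htk]

theorem mid_row_len (N : Int) (matrix : List (List Int))
    (hN : N ≤ (matrix.length : Int))
    (hrows : ∀ row ∈ (matrix.drop 1).take (N.toNat - 2), N ≤ ((row.length : Int)))
    (j : Nat) (h1 : 1 ≤ j) (h2 : j + 2 ≤ N.toNat) :
    N ≤ (((matrix.getD j []).length : Nat) : Int) := by
  have hjlen : j < matrix.length := by omega
  apply hrows
  have hlt : j - 1 < ((matrix.drop 1).take (N.toNat - 2)).length := by
    simp only [List.length_take, List.length_drop]; omega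
  have hmem := List.getElem_mem hlt
  have : ((matrix.drop 1).take (N.toNat - 2))[j - 1] = matrix.getD j [] := by
    simp only [List.getElem_take, List.getElem_drop]
    rw [List.getD_eq_getElem _ _ hjlen]
    congr 1
    omega
  rwa [this] at hmem

-- the edge-sum fold equals the recursive peel of the corresponding submatrix
set_option maxHeartbeats 1000000 in
theorem edges_eq_peel (N : Int) (matrix : List (List Int))
    (hN : N ≤ (matrix.length : Int))
    (hrows : ∀ row ∈ (matrix.drop 1).take (N.toNat - 2), N ≤ ((row.length : Int))) :
    ∀ (k : Nat) (t res : Int), 0 ≤ t → 0 ≤ res → k = (PySem.Int.floordiv (N + 1) 2 - t).toNat →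
    (PySem.List.pyRange t (PySem.Int.floordiv (N + 1) 2) 1).foldl
        (fun res t =>
          let l := N - 2 * t
          let s0 : Int := (PySem.List.slice (PySem.List.pyGetD matrix t []) (some t) (some (t + l))).sum
          let s : Int :=
            if 1 < l then
              (PySem.List.pyRange (t + 1) (t + l - 1) 1).foldl
                (fun s i =>
                  s + (PySem.List.pyGetD (PySem.List.pyGetD matrix i []) t 0
                       + PySem.List.pyGetD (PySem.List.pyGetD matrix i []) (t + l - 1) 0))
                (s0 + (PySem.List.slice (PySem.List.pyGetD matrix (t + l - 1) []) (some t) (some (t + l))).sum)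
            else s0
          max res s) res
    = max res (peel (pvSq matrix t.toNat (N - 2 * t).toNat) (N - 2 * t)) := by
  intro k
  induction k with
  | zero =>
    intro t res ht hres hn
    have hK : PySem.Int.floordiv (N + 1) 2 ≤ t := by omega
    have hle : N - 2 * t ≤ 0 := by have := fdiv_bounds N; omega
    rw [PySem.List.pyRange_one_eq_nil hK, peel_nonpos _ _ hle]
    simp [max_eq_left hres]
  | succ m ih =>
    intro t res ht hres hn
    have hK : t < PySem.Int.floordiv (N + 1) 2 := by omega
    have hl : 1 ≤ N - 2 * t := by
      have := (PySem.Int.le_floordiv_iff_mul_le (a := N + 1) (b := 2) (q := t + 1) (by omega)).mp (by omega)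
      omega
    obtain ⟨tn, htn⟩ : ∃ tn : Nat, t = (tn : Int) := ⟨t.toNat, (Int.toNat_of_nonneg ht).symm⟩
    subst htn
    obtain ⟨ln, hln⟩ : ∃ ln : Nat, N - 2 * (tn : Int) = (ln : Int) :=
      ⟨(N - 2 * (tn : Int)).toNat, (Int.toNat_of_nonneg (by omega)).symm⟩
    have hln1 : 1 ≤ ln := by omega
    have hNtn : N.toNat = 2 * tn + ln := by omega
    have hmlen : tn + ln ≤ matrix.length := by omega
    rw [PySem.List.pyRange_one_cons hK, List.foldl_cons]
    rw [ih _ _ (by omega) (le_max_of_le_left hres) (by omega)]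
    try simp only []
    rw [hln]
    have hc0 : ((tn : Int)).toNat = tn := by omega
    have hc0' : (((ln : Nat) : Int)).toNat = ln := by omega
    rw [hc0, hc0']
    have hcl1 : ((tn : Int) + ((ln : Nat) : Int) - 1) = ((tn + ln - 1 : Nat) : Int) := by omega
    conv_rhs => rw [peel]
    rw [if_neg (by omega : ¬ ((ln : Nat) : Int) ≤ 0)]
    by_cases hone : ln = 1
    · -- single-cell ring
      rw [if_pos (by omega : ((ln : Nat) : Int) = 1)]
      rw [if_neg (by omega : ¬ (1 : Int) < ((ln : Nat) : Int))]
      have hinner : N - 2 * ((tn : Int) + 1) ≤ 0 := by omega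
      rw [peel_nonpos _ _ hinner]
      rw [PySem.List.pyGetD_zero, pvSq_getD matrix tn ln 0 (by omega) hmlen]
      simp only [PySem.List.pyGetD_natCast, PySem.List.slice_natCast_add, Nat.add_zero]
      rw [max_assoc]
    · -- ln ≥ 2
      have hln2 : 2 ≤ ln := by omega
      rw [if_neg (by omega : ¬ ((ln : Nat) : Int) = 1)]
      rw [if_pos (by omega : (1 : Int) < ((ln : Nat) : Int))]
      try simp only []
      rw [shrink_eq matrix tn ln hln2]
      have hc2 : (((ln : Nat) : Int) - 2) = N - 2 * ((tn : Int) + 1) := by omega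
      have hc3 : (N - 2 * ((tn : Int) + 1)).toNat = ln - 2 := by omega
      have hc4 : ((tn : Int) + 1).toNat = tn + 1 := by omega
      rw [hc2, hc3, hc4]
      rw [max_assoc]
      -- it remains to match A's ring sum with B's perimeter
      have htop : PySem.List.pyGetD (pvSq matrix tn ln) 0 ([] : List Int)
          = ((matrix.getD tn []).drop tn).take ln := by
        rw [PySem.List.pyGetD_zero, pvSq_getD matrix tn ln 0 (by omega) hmlen, Nat.add_zero]
      have hbot : PySem.List.pyGetD (pvSq matrix tn ln) (((ln : Nat) : Int) - 1) ([] : List Int)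
          = ((matrix.getD (tn + (ln - 1)) []).drop tn).take ln := by
        have hl1 : (((ln : Nat) : Int) - 1) = ((ln - 1 : Nat) : Int) := by omega
        rw [hl1, PySem.List.pyGetD_natCast, pvSq_getD matrix tn ln (ln - 1) (by omega) hmlen]
      rw [PySem.List.foldl_add, PySem.List.foldl_add]
      have hinit :
          (PySem.List.slice (PySem.List.pyGetD matrix ((tn : Nat) : Int) []) (some ((tn : Nat) : Int))
              (some (((tn : Nat) : Int) + ((ln : Nat) : Int)))).sum
            + (PySem.List.slice (PySem.List.pyGetD matrix (((tn : Nat) : Int) + ((ln : Nat) : Int) - 1) [])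
                (some ((tn : Nat) : Int)) (some (((tn : Nat) : Int) + ((ln : Nat) : Int)))).sum
          = (PySem.List.pyGetD (pvSq matrix tn ln) 0 ([] : List Int)).sum
            + (PySem.List.pyGetD (pvSq matrix tn ln) (((ln : Nat) : Int) - 1) ([] : List Int)).sum := by
        rw [htop, hbot, hcl1]
        simp only [PySem.List.pyGetD_natCast, PySem.List.slice_natCast_add]
        have hidx : tn + ln - 1 = tn + (ln - 1) := by omega
        rw [hidx]
      rw [hinit]
      congr 2
      -- the side cells: reindex the middle rows
      rw [PySem.List.pyRange_one, PySem.List.pyRange_one]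
      have hr1 : (((tn : Nat) : Int) + ((ln : Nat) : Int) - 1 - (((tn : Nat) : Int) + 1)).toNat = ln - 2 := by omega
      have hr2 : ((((ln : Nat) : Int) - 1) - 1).toNat = ln - 2 := by omega
      rw [hr1, hr2, List.map_map, List.map_map, add_right_inj]
      refine congrArg List.sum (List.map_congr_left ?_)
      intro kk hkk
      rw [List.mem_range] at hkk
      simp only [Function.comp_apply]
      have hjc : ((tn : Nat) : Int) + 1 + (kk : Int) = ((tn + 1 + kk : Nat) : Int) := by push_cast; ring
      have hrowlen : N ≤ (((matrix.getD (tn + 1 + kk) []).length : Nat) : Int) :=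
        mid_row_len N matrix hN hrows (tn + 1 + kk) (by omega) (by omega)
      have hrl : tn + ln ≤ (matrix.getD (tn + 1 + kk) []).length := by omega
      have hAside : PySem.List.pyGetD (PySem.List.pyGetD matrix (((tn : Nat) : Int) + 1 + (kk : Int)) []) ((tn : Nat) : Int) 0
            + PySem.List.pyGetD (PySem.List.pyGetD matrix (((tn : Nat) : Int) + 1 + (kk : Int)) []) (((tn : Nat) : Int) + ((ln : Nat) : Int) - 1) 0
          = (matrix.getD (tn + 1 + kk) []).getD tn 0
            + (matrix.getD (tn + 1 + kk) []).getD (tn + (ln - 1)) 0 := by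
        rw [hjc, hcl1]
        simp only [PySem.List.pyGetD_natCast]
        congr 2
        omega
      rw [hAside]
      have hbc : (1 : Int) + (kk : Int) = ((1 + kk : Nat) : Int) := by push_cast; ring
      rw [hbc, PySem.List.pyGetD_natCast]
      rw [pvSq_getD matrix tn ln (1 + kk) (by omega) hmlen]
      have hj2 : tn + (1 + kk) = tn + 1 + kk := by omega
      rw [hj2]
      rw [PySem.List.pyGetD_zero]
      have hlc : (((ln : Nat) : Int) - 1) = ((ln - 1 : Nat) : Int) := by omega
      rw [hlc, PySem.List.pyGetD_natCast]
      rw [row_getD _ tn ln 0 (by omega) hrl, row_getD _ tn ln (ln - 1) (by omega) hrl]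
      have h00 : tn + 0 = tn := rfl
      rw [h00]

-- ===== VERDICT (by name: the statement is the Claim_ definition above) =====
theorem find_max_layer_spec : Claim_equal_find_max_layer := by
  intro N matrix _hdom hpre
  unfold Spec_find_max_layer find_max_layer find_max_layer_alt
  by_cases hNpos : N ≤ 0
  · have hf : PySem.Int.floordiv (N + 1) 2 ≤ 0 := by have := fdiv_bounds N; omega
    rw [PySem.List.pyRange_one_eq_nil hf, peel_nonpos _ _ hNpos]
    rfl
  · obtain ⟨hN, hrows⟩ : N ≤ (matrix.length : Int) ∧
        ∀ row ∈ (matrix.drop 1).take (N.toNat - 2), N ≤ ((row.length : Int)) := by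
      rcases hpre with h | h
      · omega
      · exact h
    have hA := outer_eq N matrix (PySem.Int.floordiv (N + 1) 2 - 0).toNat 0 0 rfl
    have hN0 : N - 2 * (0 : Int) = N := by ring
    rw [hN0] at hA
    rw [hA]
    have hB := edges_eq_peel N matrix hN hrows (PySem.Int.floordiv (N + 1) 2 - 0).toNat 0 0 le_rfl le_rfl rfl
    rw [hN0] at hB
    rw [hB]
    have hslice : ∀ {α : Type} (xs : List α), PySem.List.slice xs none (some N) = xs.take N.toNat :=
      fun xs => PySem.List.slice_to xs (by omega)
    have hsq : ((PySem.List.slice matrix none (some N)).map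
          (fun row => PySem.List.slice row none (some N)))
        = pvSq matrix (0 : Int).toNat N.toNat := by
      simp only [hslice, pvSq, Int.toNat_zero, List.drop_zero]
    rw [hsq]
    exact max_eq_right (peel_nonneg _ _)
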